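-- pv_equiv track=rewrite | github.com/BradPietrzak/NeuroDrone | headsetAI/raw_brain_data_deployment.py | merge_json_data
-- ===== SOURCE A (Python) =====
-- def merge_json_data(json_data):
--     """
--         Merges and processes raw JSON EEG data into a new format with specified constraints.
--
--         Parameters:
--             json_data (list of dict): A list of JSON objects, where each object contains EEG data
--                                       under the "data" key. Each "data" key maps to a list of lists
--                                       representing channels and their respective samples.
--
--         Returns:
--             list of lists: A 2D list where each sublist corresponds to a channel (8 total),
--                            and contains up to 16 samples per data array, merged from the input JSON data.
--
--         Functionality:
--             - Creates a new 2D list (`new_json_data`) with 8 empty lists, one for each EEG channel.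
--             - Iterates through the input JSON data (`json_data`), which contains multiple datasets.
--             - For each dataset:
--                 - Loops through the first 8 channels in the "data" field.
--                 - Appends up to 16 elements (samples) from each channel to the corresponding channel list in `new_json_data`.
--                 - Skips additional samples or channels beyond the specified limits (8 channels, 16 samples per channel).
--             - Prints the progress and structure of the merged data during the process.
--
--         Example Input:
--             json_data = [
--                 {"data": [[1, 2, 3], [4, 5, 6], [7, 8, 9], ...]},
--                 {"data": [[10, 11, 12], [13, 14, 15], [16, 17, 18], ...]},
--                 ...
--             ]
--
--         Example Output:
--             [
--                 [1, 2, 3, 10, 11, 12],  # Merged samples for channel 1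
--                 [4, 5, 6, 13, 14, 15],  # Merged samples for channel 2
--                 [7, 8, 9, 16, 17, 18],  # Merged samples for channel 3
--                 ...
--             ]
--
--         Notes:
--             - Assumes that each dataset contains a "data" key with a list of channel data.
--             - Limits processing to the first 8 channels and first 16 samples per channel to maintain structure and size consistency.
--             - Logs information to the console for debugging and progress tracking.
--         """
--     new_json_data = [[] for _ in range(8)]
--     #print_flat_array(new_json_data)
--     for data_set_obj in json_data:
--
--         i = 0
--         for data_array in data_set_obj["data"]:
--             if i < 8:
--                 j = 0
--                 for element in data_array:
--                     if j < 16: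
--                         new_json_data[i].append(element)
--                     j += 1
--                 i += 1
--             else:
--                 break
--
--     return new_json_data
-- ===== SOURCE B (Python) =====
-- def merge_json_data(json_data):
--     new_json_data = [[] for _ in range(8)]
--     for i in range(8):
--         for data_set_obj in json_data:
--             data = data_set_obj["data"]
--             if i < len(data):
--                 new_json_data[i].extend(data[i][:16])
--     return new_json_data
-- ===== Notes on version B (the rewrite author's own statement) =====
-- stated objective: alternative
-- what changed: Channel-major traversal: the outer loop runs over the 8 channels and the inner loop over the datasets, extending each channel list with a 16-sample slice, instead of A's dataset-major pass with element-by-element appends under i/j counters.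
import Mathlib
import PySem

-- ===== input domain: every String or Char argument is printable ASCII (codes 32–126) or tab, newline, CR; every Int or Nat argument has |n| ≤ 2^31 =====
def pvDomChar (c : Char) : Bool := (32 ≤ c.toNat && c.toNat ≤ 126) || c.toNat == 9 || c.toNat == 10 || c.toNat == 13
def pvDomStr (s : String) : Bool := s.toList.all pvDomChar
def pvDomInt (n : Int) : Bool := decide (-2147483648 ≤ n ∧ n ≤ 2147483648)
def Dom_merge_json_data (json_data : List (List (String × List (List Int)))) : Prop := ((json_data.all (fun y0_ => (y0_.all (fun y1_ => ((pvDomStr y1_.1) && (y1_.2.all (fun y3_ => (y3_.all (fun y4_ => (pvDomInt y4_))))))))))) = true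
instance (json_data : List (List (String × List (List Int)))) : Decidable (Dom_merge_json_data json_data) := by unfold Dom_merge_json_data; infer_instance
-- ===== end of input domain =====

-- B re-implements the merge channel-major (outer loop over the 8 channels, inner over datasets,
-- extending with a 16-sample slice) instead of A's dataset-major element-by-element appends;
-- same cost, different decomposition ("alternative").

-- ===== PORT A =====
-- ds["data"]: first-match lookup in the association list (none = KeyError, excluded by Pre_)
def pvDataOf (ds : List (String × List (List Int))) : Option (List (List Int)) :=
  List.lookup "data" ds

-- inner 'for element in data_array: if j < 16: new_json_data[i].append(element); j += 1'
def pvInnerA (new : List (List Int)) (i : Nat) (arr : List Int) : List (List Int) :=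
  (arr.foldl (fun (st : List (List Int) × Nat) e =>
      (if st.2 < 16 then st.1.modify i (fun c => c ++ [e]) else st.1, st.2 + 1)) (new, 0)).1

-- middle 'for data_array in data_set_obj["data"]: if i < 8: … i += 1 else: break'
def pvChannelsA : List (List Int) → Nat → List (List Int) → List (List Int)
  | new, _, [] => new
  | new, i, arr :: rest => if i < 8 then pvChannelsA (pvInnerA new i arr) (i + 1) rest else new

def pvStepA (new : List (List Int)) (ds : List (String × List (List Int))) : List (List Int) :=
  match pvDataOf ds with
  | some data => pvChannelsA new 0 data
  | none => new   -- KeyError in Python: outside Pre_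

def merge_json_data (json_data : List (List (String × List (List Int)))) : List (List Int) :=
  json_data.foldl pvStepA ((List.range 8).map (fun _ => ([] : List Int)))

-- ===== PORT B =====
-- inner 'for data_set_obj in json_data: data = data_set_obj["data"]; if i < len(data): new_json_data[i].extend(data[i][:16])'
def pvStepB (i : Nat) (acc : List Int) (ds : List (String × List (List Int))) : List Int :=
  match pvDataOf ds with
  | some data => if i < data.length then acc ++ (data.getD i []).take 16 else acc
  | none => acc   -- KeyError in Python: outside Pre_

def merge_json_data_alt (json_data : List (List (String × List (List Int)))) : List (List Int) :=
  (List.range 8).map (fun i => json_data.foldl (pvStepB i) ([] : List Int))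

-- ===== PRECONDITION & SPEC =====
-- Pre_ excludes exactly the inputs where both Pythons raise KeyError: a dataset without a "data" key.
def Pre_merge_json_data (json_data : List (List (String × List (List Int)))) : Prop :=
  ∀ ds ∈ json_data, (List.lookup "data" ds).isSome = true
instance (json_data : List (List (String × List (List Int)))) : Decidable (Pre_merge_json_data json_data) := by unfold Pre_merge_json_data; infer_instance

def pvWitness_merge_json_data : (List (List (String × List (List Int)))) :=
  [[("data", [[1, 2], [3]])], [("data", [[4]])]]

def Spec_merge_json_data (json_data : List (List (String × List (List Int)))) (out : List (List Int)) : Prop := out = merge_json_data_alt json_data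
instance (json_data : List (List (String × List (List Int)))) (out : List (List Int)) : Decidable (Spec_merge_json_data json_data out) := by unfold Spec_merge_json_data; infer_instance

-- ===== CLAIM (what is proved, stated in full; the proofs are below) =====
def Claim_equal_merge_json_data : Prop := ∀ (json_data : List (List (String × List (List Int)))), Dom_merge_json_data json_data → Pre_merge_json_data json_data → Spec_merge_json_data json_data (merge_json_data json_data)

-- ===== LEMMAS AND PROOFS =====

-- what one dataset contributes to channel i (proof-side characterisation)
def pvContrib (i : Nat) (ds : List (String × List (List Int))) : List Int :=
  match pvDataOf ds with
  | some data => if i < data.length then (data.getD i []).take 16 else []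
  | none => []

theorem pvStepB_eq (i : Nat) (acc : List Int) (ds : List (String × List (List Int))) :
    pvStepB i acc ds = acc ++ pvContrib i ds := by
  unfold pvStepB pvContrib
  cases pvDataOf ds with
  | none => simp
  | some data => by_cases h : i < data.length <;> simp [h]

theorem foldB_eq (l : List (List (String × List (List Int)))) (i : Nat) (t : List Int) :
    l.foldl (pvStepB i) t = t ++ l.flatMap (pvContrib i) := by
  induction l generalizing t with
  | nil => simp
  | cons ds l ih => simp [pvStepB_eq, ih, List.append_assoc]

theorem pvInnerA_fold (arr : List Int) (new : List (List Int)) (i j : Nat) :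
    (arr.foldl (fun (st : List (List Int) × Nat) e =>
        (if st.2 < 16 then st.1.modify i (fun c => c ++ [e]) else st.1, st.2 + 1)) (new, j)).1
      = new.modify i (fun c => c ++ arr.take (16 - j)) := by
  induction arr generalizing new j with
  | nil =>
    simp only [List.foldl_nil, List.take_nil]
    have h : (fun c : List Int => c ++ ([] : List Int)) = id := by funext c; simp
    rw [h, List.modify_id]
  | cons e rest ih =>
    rw [List.foldl_cons]
    by_cases h : j < 16
    · simp only [h, if_pos]
      rw [ih, List.modify_modify_eq]
      have h16 : 16 - j = (16 - (j + 1)) + 1 := by omega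
      rw [h16]
      congr 1
      funext c
      simp [List.take_succ_cons]
    · simp only [h, if_neg, not_false_iff]
      rw [ih]
      have h1 : 16 - (j + 1) = 0 := by omega
      have h2 : 16 - j = 0 := by omega
      rw [h1, h2]
      simp

theorem pvInnerA_eq (new : List (List Int)) (i : Nat) (arr : List Int) :
    pvInnerA new i arr = new.modify i (fun c => c ++ arr.take 16) := by
  unfold pvInnerA
  exact pvInnerA_fold arr new i 0

theorem pvChannelsA_getElem? (data : List (List Int)) (new : List (List Int)) (i k : Nat) :
    (pvChannelsA new i data)[k]? =
      new[k]?.map (fun c => c ++ (if i ≤ k ∧ k - i < data.length ∧ k < 8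
        then ((data.getD (k - i) []).take 16) else [])) := by
  induction data generalizing new i with
  | nil =>
    simp [pvChannelsA]
  | cons arr rest ih =>
    simp only [pvChannelsA]
    by_cases h8 : i < 8
    · rw [if_pos h8, ih, pvInnerA_eq, List.getElem?_modify]
      by_cases hik : i = k
      · subst hik
        have c1 : ¬ (i + 1 ≤ i ∧ i - (i + 1) < rest.length ∧ i < 8) := by omega
        have c2 : i ≤ i ∧ i - i < (arr :: rest).length ∧ i < 8 :=
          ⟨le_refl i, by simp, h8⟩
        simp only [if_true, if_neg c1, if_pos c2]
        simp [Option.map_map, Function.comp_def]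
      · simp only [if_neg hik]
        by_cases hcond : i + 1 ≤ k ∧ k - (i + 1) < rest.length ∧ k < 8
        · have hcond' : i ≤ k ∧ k - i < (arr :: rest).length ∧ k < 8 :=
            ⟨by omega, by simp only [List.length_cons]; omega, hcond.2.2⟩
          have hs : k - i = (k - (i + 1)) + 1 := by omega
          simp only [if_pos hcond, if_pos hcond']
          simp only [hs, List.getD_cons_succ]
          simp
        · have hcond' : ¬ (i ≤ k ∧ k - i < (arr :: rest).length ∧ k < 8) := by
            simp only [List.length_cons]; omega
          simp only [if_neg hcond, if_neg hcond']
          simp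
    · rw [if_neg h8]
      have hc : ¬ (i ≤ k ∧ k - i < (arr :: rest).length ∧ k < 8) := by
        simp only [List.length_cons]; omega
      simp only [if_neg hc]
      simp

theorem pvStepA_getElem? (acc : List (List Int)) (ds : List (String × List (List Int))) (k : Nat) :
    (pvStepA acc ds)[k]? = acc[k]?.map (fun c => c ++ (if k < 8 then pvContrib k ds else [])) := by
  unfold pvStepA pvContrib
  cases pvDataOf ds with
  | none => simp
  | some data =>
    rw [pvChannelsA_getElem?]
    congr 1
    funext c
    by_cases hk8 : k < 8 <;> by_cases hkl : k < data.length <;> simp [hk8, hkl]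

theorem foldA_getElem? (l : List (List (String × List (List Int)))) (acc : List (List Int)) (k : Nat) :
    (l.foldl pvStepA acc)[k]? =
      acc[k]?.map (fun c => c ++ (if k < 8 then l.flatMap (pvContrib k) else [])) := by
  induction l generalizing acc with
  | nil => simp
  | cons ds l ih =>
    rw [List.foldl_cons, ih, pvStepA_getElem?, Option.map_map]
    congr 1
    funext c
    by_cases hk8 : k < 8 <;> simp [hk8, List.append_assoc]

-- ===== VERDICT (by name: the statement is the Claim_ definition above) =====
theorem merge_json_data_spec : Claim_equal_merge_json_data := by
  intro json_data _hDom _hPre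
  unfold Spec_merge_json_data
  apply List.ext_getElem?
  intro k
  unfold merge_json_data merge_json_data_alt
  rw [foldA_getElem?]
  simp only [List.getElem?_map]
  by_cases hk : k < 8 <;> simp [hk, foldB_eq]
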